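-- pv_equiv track=rewrite | github.com/chaeonee/Programmers | level3/불량사용자.py | getBanned
-- ===== SOURCE A (Python) =====
-- def getBanned(s,candidate,ban_list,result):
--     if s == len(candidate):
--         result.append(sorted([i for i in ban_list]))
--         return result
--
--     for c in candidate[s]:
--         if c in ban_list:
--             continue
--         ban_list.append(c)
--         result = getBanned(s+1,candidate,ban_list,result)
--         ban_list.pop()
--
--     return result
-- ===== SOURCE B (Python) =====
-- def getBanned(s, candidate, ban_list, result):
--     # Non-mutating: unlike A, does not append to result/ban_list in place (return value is the same).
--     pools = [candidate[i] for i in range(s, len(candidate))]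
--     combos = [[]]
--     for pool in pools:
--         combos = [cmb + [c] for cmb in combos for c in pool]
--     base = list(ban_list)
--     out = list(result)
--     for combo in combos:
--         seen = set(base)
--         ok = True
--         for c in combo:
--             if c in seen:
--                 ok = False
--                 break
--             seen.add(c)
--         if ok:
--             out.append(sorted(base + combo))
--     return out
-- ===== Notes on version B (the rewrite author's own statement) =====
-- stated objective: alternative
-- what changed: Replaces A's mutating DFS backtracking (append/recurse/pop over a shared ban_list) with a flat enumeration: build the whole assignment space as an iteratively-grown product of the candidate rows, then filter each combo with a seen-set validity check and append sorted(ban_list+combo) to a fresh output list.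
import Mathlib
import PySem

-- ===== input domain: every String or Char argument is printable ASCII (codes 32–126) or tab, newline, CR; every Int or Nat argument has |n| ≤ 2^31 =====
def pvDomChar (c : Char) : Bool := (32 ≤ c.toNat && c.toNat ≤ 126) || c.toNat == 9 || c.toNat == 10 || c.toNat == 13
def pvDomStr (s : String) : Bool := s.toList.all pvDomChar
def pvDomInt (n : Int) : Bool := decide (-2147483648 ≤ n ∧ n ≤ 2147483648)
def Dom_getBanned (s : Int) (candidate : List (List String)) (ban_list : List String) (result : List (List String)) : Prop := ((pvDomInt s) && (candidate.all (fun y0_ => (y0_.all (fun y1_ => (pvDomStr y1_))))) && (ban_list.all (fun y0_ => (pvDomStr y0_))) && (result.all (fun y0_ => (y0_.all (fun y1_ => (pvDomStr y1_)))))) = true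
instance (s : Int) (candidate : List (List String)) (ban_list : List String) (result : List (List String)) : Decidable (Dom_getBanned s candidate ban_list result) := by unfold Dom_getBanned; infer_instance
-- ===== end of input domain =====

-- B replaces A's mutating DFS backtracking by an iteratively-built product of the candidate rows
-- filtered by a seen-set validity check (alternative algorithm; equivalence is about the RETURN
-- value only: A mutates ban_list and appends into the caller's result list, B does not).

-- ===== PORT A =====
-- termination helper for the port's recursion (cited in decreasing_by)
theorem pvPyGet_lt {α : Type} {xs : List α} {i : Int} {x : α}
    (h : PySem.List.pyGet? xs i = some x) : i < (xs.length : Int) := by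
  by_cases h0 : 0 ≤ i
  · rw [PySem.List.pyGet?_of_nonneg xs h0] at h
    obtain ⟨hlt, -⟩ := List.getElem?_eq_some_iff.mp h
    omega
  · omega

mutual
-- literal transliteration of A: the base case, and the 'for c in candidate[s]' loop as getBannedLoop
def getBanned (s : Int) (candidate : List (List String)) (ban_list : List String) (result : List (List String)) : List (List String) :=
  if s = (candidate.length : Int) then
    result ++ [PySem.List.sorted (ban_list.map (fun i => i)) (fun x => x) false]
  else
    match h : PySem.List.pyGet? candidate s with
    | none => result   -- Python raises IndexError here; excluded by Pre_getBanned
    | some row => getBannedLoop s candidate ban_list row result (pvPyGet_lt h)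
  termination_by (((candidate.length : Int) - s).toNat, 1, 0)
  decreasing_by exact Prod.Lex.right _ (Prod.Lex.left _ _ (by omega))

def getBannedLoop (s : Int) (candidate : List (List String)) (ban_list : List String) (row : List String) (result : List (List String)) (h : s < (candidate.length : Int)) : List (List String) :=
  match row with
  | [] => result
  | c :: rest =>
    if ban_list.contains c then
      getBannedLoop s candidate ban_list rest result h
    else
      getBannedLoop s candidate ban_list rest (getBanned (s + 1) candidate (ban_list ++ [c]) result) h
  termination_by (((candidate.length : Int) - s).toNat, 0, row.length)
  decreasing_by
    · exact Prod.Lex.right _ (Prod.Lex.right _ (by simp only [List.length_cons]; omega))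
    · exact Prod.Lex.left _ _ (by omega)
    · exact Prod.Lex.right _ (Prod.Lex.right _ (by simp only [List.length_cons]; omega))
end

-- ===== PORT B =====
-- the inner 'for c in combo' seen-set loop of Source B (break ↦ early false)
def altOk (seen : PySem.Set String) : List String → Bool
  | [] => true
  | c :: rest => if PySem.Set.contains seen c then false else altOk (PySem.Set.add seen c) rest

def getBanned_alt (s : Int) (candidate : List (List String)) (ban_list : List String) (result : List (List String)) : List (List String) :=
  let pools := (PySem.List.pyRange s (candidate.length : Int) 1).map
      (fun i => PySem.List.pyGetD candidate i [])   -- candidate[i]; the default is never read under Pre_getBanned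
  let combos := pools.foldl (fun cs pool => cs.flatMap (fun cmb => pool.map (fun c => cmb ++ [c]))) [[]]
  combos.foldl
    (fun out combo =>
      if altOk (PySem.Set.ofList ban_list) combo then
        out ++ [PySem.List.sorted (ban_list ++ combo) (fun x => x) false]
      else out)
    result

-- ===== PRECONDITION & SPEC =====
-- Pre_ excludes exactly the inputs where A raises IndexError on candidate[s]: s > len(candidate) or s < -len(candidate).
def Pre_getBanned (s : Int) (candidate : List (List String)) (_ban_list : List String) (_result : List (List String)) : Prop :=
  -(candidate.length : Int) ≤ s ∧ s ≤ (candidate.length : Int)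
instance (s : Int) (candidate : List (List String)) (ban_list : List String) (result : List (List String)) : Decidable (Pre_getBanned s candidate ban_list result) := by unfold Pre_getBanned; infer_instance

def pvWitness_getBanned : Int × List (List String) × List String × List (List String) :=
  (0, [["ab", "cd"], ["cd"]], ["x"], [])

def Spec_getBanned (s : Int) (candidate : List (List String)) (ban_list : List String) (result : List (List String)) (out : List (List String)) : Prop := out = getBanned_alt s candidate ban_list result
instance (s : Int) (candidate : List (List String)) (ban_list : List String) (result : List (List String)) (out : List (List String)) : Decidable (Spec_getBanned s candidate ban_list result out) := by unfold Spec_getBanned; infer_instance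

-- ===== CLAIM (what is proved, stated in full; the proofs are below) =====
def Claim_equal_getBanned : Prop := ∀ (s : Int) (candidate : List (List String)) (ban_list : List String) (result : List (List String)), Dom_getBanned s candidate ban_list result → Pre_getBanned s candidate ban_list result → Spec_getBanned s candidate ban_list result (getBanned s candidate ban_list result)


-- ===== LEMMAS AND PROOFS =====

-- proof-side normal forms: the product of the remaining rows, the non-set validity predicate,
-- the pools from position s, and the common closed form pvOut
def pvProd : List (List String) → List (List String)
  | [] => [[]]
  | p :: ps => p.flatMap (fun c => (pvProd ps).map (fun t => c :: t))

def pvOk (ban : List String) : List String → Bool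
  | [] => true
  | c :: rest => !ban.contains c && pvOk (ban ++ [c]) rest

def pvPools (candidate : List (List String)) (s : Int) : List (List String) :=
  (PySem.List.pyRange s (candidate.length : Int) 1).map (fun i => PySem.List.pyGetD candidate i [])

def pvOut (candidate : List (List String)) (s : Int) (ban : List String) : List (List String) :=
  ((pvProd (pvPools candidate s)).filter (pvOk ban)).map
    (fun t => PySem.List.sorted (ban ++ t) (fun x => x) false)

theorem pvContains_ofList (ban : List String) (c : String) :
    PySem.Set.contains (PySem.Set.ofList ban) c = ban.contains c := by
  rw [Bool.eq_iff_iff, PySem.Set.contains_iff, PySem.Set.mem_ofList, List.contains_iff_mem]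

theorem pvAdd_ofList (ban : List String) (c : String) :
    PySem.Set.add (PySem.Set.ofList ban) c = PySem.Set.ofList (ban ++ [c]) := by
  rw [PySem.Set.ofList_eq_foldl, PySem.Set.ofList_eq_foldl, List.foldl_append, List.foldl_cons, List.foldl_nil]

theorem pvOk_eq_altOk (combo : List String) : ∀ ban : List String,
    altOk (PySem.Set.ofList ban) combo = pvOk ban combo := by
  induction combo with
  | nil => intro ban; rfl
  | cons c rest ih =>
    intro ban
    rw [altOk, pvContains_ofList, pvAdd_ofList, ih]
    by_cases hb : c ∈ ban <;> simp [hb, pvOk]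

theorem pvFoldl_prod (pools : List (List String)) (cs : List (List String)) :
    pools.foldl (fun cs pool => cs.flatMap (fun cmb => pool.map (fun c => cmb ++ [c]))) cs
      = cs.flatMap (fun cmb => (pvProd pools).map (fun t => cmb ++ t)) := by
  induction pools generalizing cs with
  | nil => simp [pvProd]
  | cons p ps ih =>
    rw [List.foldl_cons, ih]
    simp [pvProd, List.flatMap_map, List.map_flatMap, List.flatMap_assoc, Function.comp_def]

-- B's closed form
theorem pvAlt_char (s : Int) (candidate : List (List String)) (ban_list : List String) (result : List (List String)) :
    getBanned_alt s candidate ban_list result = result ++ pvOut candidate s ban_list := by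
  simp only [getBanned_alt]
  rw [pvFoldl_prod, PySem.List.foldl_append_if (p := altOk (PySem.Set.ofList ban_list))
      (f := fun combo => PySem.List.sorted (ban_list ++ combo) (fun x => x) false)]
  have hfun : altOk (PySem.Set.ofList ban_list) = pvOk ban_list :=
    funext (fun combo => pvOk_eq_altOk combo ban_list)
  simp [pvOut, pvPools, hfun]

-- one unfolding of pvOut at a position s with a valid row
theorem pvOut_cons (candidate : List (List String)) (s : Int) (ban : List String)
    (_hlo : -(candidate.length : Int) ≤ s) (hs : s < (candidate.length : Int)) :
    pvOut candidate s ban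
      = (PySem.List.pyGetD candidate s []).flatMap
          (fun c => if ban.contains c then [] else pvOut candidate (s + 1) (ban ++ [c])) := by
  have hrange := PySem.List.pyRange_one_cons hs
  rw [pvOut, pvPools, hrange, List.map_cons]
  rw [show pvProd (PySem.List.pyGetD candidate s [] :: (PySem.List.pyRange (s+1) (candidate.length : Int)).map (fun i => PySem.List.pyGetD candidate i []))
        = (PySem.List.pyGetD candidate s []).flatMap
            (fun c => (pvProd (pvPools candidate (s+1))).map (fun t => c :: t)) from rfl]
  rw [List.filter_flatMap, List.map_flatMap]
  apply List.flatMap_congr  -- pointwise over the row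
  intro c _
  rw [List.filter_map]
  by_cases hb : c ∈ ban
  · simp [Function.comp_def, pvOk, hb]
  · simp only [Function.comp_def, pvOk, hb, List.contains_eq_mem, decide_false,
      Bool.not_false, Bool.true_and]
    rw [pvOut]
    simp [List.map_map, Function.comp_def, List.append_assoc]

-- the 'for c in candidate[s]' loop, assuming the closed form one level deeper
theorem pvLoop_char (candidate : List (List String)) (s : Int) (h : s < (candidate.length : Int))
    (IH : ∀ (ban : List String) (result : List (List String)),
      getBanned (s + 1) candidate ban result = result ++ pvOut candidate (s + 1) ban) :
    ∀ (row : List String) (ban : List String) (result : List (List String)),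
      getBannedLoop s candidate ban row result h
        = result ++ row.flatMap (fun c => if ban.contains c then [] else pvOut candidate (s + 1) (ban ++ [c])) := by
  intro row
  induction row with
  | nil => intro ban result; simp [getBannedLoop]
  | cons c rest ih =>
    intro ban result
    rw [getBannedLoop]
    by_cases hb : c ∈ ban
    · simp [hb, ih]
    · simp [hb, ih, IH, List.append_assoc]

-- A's closed form (the same one), by induction on the distance to the end
theorem pvA_char (candidate : List (List String)) : ∀ (k : Nat) (s : Int), ((candidate.length : Int) - s).toNat = k →
    -(candidate.length : Int) ≤ s → s ≤ (candidate.length : Int) →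
    ∀ (ban_list : List String) (result : List (List String)),
    getBanned s candidate ban_list result = result ++ pvOut candidate s ban_list := by
  intro k
  induction k with
  | zero =>
    intro s hk _ hhi ban result
    have hs : s = (candidate.length : Int) := by omega
    rw [getBanned, if_pos hs, pvOut, pvPools, hs, PySem.List.pyRange_one_eq_nil (le_refl _)]
    simp [pvProd, pvOk]
  | succ k ihk =>
    intro s hk hlo hhi ban result
    have hs : s < (candidate.length : Int) := by omega
    have hns : ¬ s = (candidate.length : Int) := by omega
    obtain ⟨row, hrow⟩ : ∃ row, PySem.List.pyGet? candidate s = some row := by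
      cases hg : PySem.List.pyGet? candidate s with
      | none =>
        rw [PySem.List.pyGet?_eq_none_iff] at hg
        exact absurd (by constructor <;> omega : PySem.Raise.InRange candidate.length s) hg
      | some r => exact ⟨r, rfl⟩
    have hgetD : PySem.List.pyGetD candidate s [] = row := by
      simp [PySem.List.pyGetD, hrow]
    have IH : ∀ (ban : List String) (result : List (List String)),
        getBanned (s + 1) candidate ban result = result ++ pvOut candidate (s + 1) ban := by
      intro ban' result'
      exact ihk (s + 1) (by omega) (by omega) (by omega) ban' result'
    rw [getBanned, if_neg hns]
    rw [pvOut_cons candidate s ban hlo hs, hgetD]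
    have := pvLoop_char candidate s hs IH row ban result
    -- reduce the dependent match on pyGet? using hrow
    split
    · next heq => rw [hrow] at heq; cases heq
    · next r heq =>
      rw [hrow] at heq
      cases heq
      exact this

-- ===== VERDICT (by name: the statement is the Claim_ definition above) =====
theorem getBanned_spec : Claim_equal_getBanned := by
  intro s candidate ban_list result _ hpre
  unfold Spec_getBanned
  rw [pvA_char candidate _ s rfl hpre.1 hpre.2, pvAlt_char]
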